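-- pv_equiv track=rewrite | github.com/JamesWheeler4/James_Portfolio | Proj_5 Track and Field scouting tool/APHighSchool.py | eventType
-- ===== SOURCE A (Python) =====
-- def eventType(x):  # Determine what event type the each entry is to sort later
--     eventR = ('100 Meters', '200 Meters', '400 Meters', '800 Meters', '1500 Meters', '1600 Meters',
--               '3000 Meters', '3200 Meters', '110m Hurdles - 39"', '300m Hurdles - 36"', '100m Hurdles - 33"',
--               '300m Hurdles - 30"')
--     eventF = ('Shot Put - 12lb', 'Shot Put - 4kg', 'Discus - 1.6kg', 'Discus - 1kg', 'Javelin - 800g',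
--               'Javelin - 600g', 'High Jump', 'Pole Vault', 'Long Jump', 'Triple Jump', 'Hammer - 16lb',
--               'Hammer - 4kg')
--
--     for i in eventR:
--         if i == x:
--             return 'R'
--
--     for i in eventF:
--         if i == x:
--             return 'F'
-- ===== SOURCE B (Python) =====
-- _EVENT_R = ('100 Meters', '200 Meters', '400 Meters', '800 Meters', '1500 Meters', '1600 Meters',
--             '3000 Meters', '3200 Meters', '110m Hurdles - 39"', '300m Hurdles - 36"', '100m Hurdles - 33"',
--             '300m Hurdles - 30"')
-- _EVENT_F = ('Shot Put - 12lb', 'Shot Put - 4kg', 'Discus - 1.6kg', 'Discus - 1kg', 'Javelin - 800g',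
--             'Javelin - 600g', 'High Jump', 'Pole Vault', 'Long Jump', 'Triple Jump', 'Hammer - 16lb',
--             'Hammer - 4kg')
--
-- # One name-sorted table built once; each call binary-searches it.
-- _TABLE = sorted([(e, 'R') for e in _EVENT_R] + [(e, 'F') for e in _EVENT_F],
--                 key=lambda p: p[0])
--
--
-- def _bsearch(t, x):
--     if not t:
--         return None
--     m = len(t) // 2
--     k, v = t[m]
--     if x == k:
--         return v
--     if x < k:
--         return _bsearch(t[:m], x)
--     return _bsearch(t[m + 1:], x)
--
--
-- def eventType(x):
--     return _bsearch(_TABLE, x)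
-- ===== Notes on version B (the rewrite author's own statement) =====
-- stated objective: alternative
-- what changed: A's two sequential linear scans with a branch per tuple are replaced by a name-sorted (event, tag) table built once plus a recursive binary search over it, so the per-call work is O(log n) three-way comparisons instead of two O(n) equality scans.
import Mathlib
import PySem

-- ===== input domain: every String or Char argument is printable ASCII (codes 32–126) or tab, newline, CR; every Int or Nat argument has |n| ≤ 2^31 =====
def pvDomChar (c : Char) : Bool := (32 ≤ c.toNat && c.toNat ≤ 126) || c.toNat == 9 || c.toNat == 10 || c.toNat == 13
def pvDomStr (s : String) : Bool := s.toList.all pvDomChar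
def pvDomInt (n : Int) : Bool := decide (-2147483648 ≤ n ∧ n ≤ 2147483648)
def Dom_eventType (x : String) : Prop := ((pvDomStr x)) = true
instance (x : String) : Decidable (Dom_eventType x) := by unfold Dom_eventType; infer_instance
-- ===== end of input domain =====

-- B replaces A's two linear equality scans by a name-sorted table built once plus a
-- recursive binary search over it (alternative algorithm; same behaviour).

-- ===== PORT A =====
def eventRList : List String := ["100 Meters", "200 Meters", "400 Meters", "800 Meters", "1500 Meters",
  "1600 Meters", "3000 Meters", "3200 Meters", "110m Hurdles - 39\"", "300m Hurdles - 36\"",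
  "100m Hurdles - 33\"", "300m Hurdles - 30\""]
def eventFList : List String := ["Shot Put - 12lb", "Shot Put - 4kg", "Discus - 1.6kg", "Discus - 1kg",
  "Javelin - 800g", "Javelin - 600g", "High Jump", "Pole Vault", "Long Jump", "Triple Jump",
  "Hammer - 16lb", "Hammer - 4kg"]

-- 'for i in t: if i == x: return tag' as structural recursion
def scanFor (l : List String) (x : String) (tag : String) : Option String :=
  match l with
  | [] => none
  | i :: rest => if i == x then some tag else scanFor rest x tag

def eventType (x : String) : Option String :=
  match scanFor eventRList x "R" with
  | some r => some r
  | none => scanFor eventFList x "F"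

-- ===== PORT B =====
-- _TABLE = sorted([(e,'R') for e in _EVENT_R] + [(e,'F') for e in _EVENT_F], key=lambda p: p[0])
def eventTable : List (String × String) :=
  PySem.List.sorted (eventRList.map (fun e => (e, "R")) ++ eventFList.map (fun e => (e, "F")))
    Prod.fst

-- _bsearch(t, x): recursive binary search by splitting at the middle index.
def bsearch : List (String × String) → String → Option String
  | [], _ => none
  | a :: rest, x =>
    let t := a :: rest
    let m : Nat := t.length / 2          -- len(t) // 2 (nonnegative: Nat division is exact here)
    match PySem.List.pyGet? t (m : Int) with   -- k, v = t[m]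
    | none => none                             -- unreachable: m < len(t)
    | some (k, v) =>
      if x == k then some v
      else if x < k then bsearch (PySem.List.slice t none (some (m : Int))) x      -- t[:m]
      else bsearch (PySem.List.slice t (some ((m : Int) + 1)) none) x              -- t[m+1:]
termination_by t _ => t.length
decreasing_by
  · rw [PySem.List.slice_to]
    · simp only [List.length_take, Int.toNat_natCast, List.length_cons]; omega
    · positivity
  · rw [PySem.List.slice_from]
    · simp only [List.length_drop, List.length_cons]; omega
    · positivity

def eventType_alt (x : String) : Option String := bsearch eventTable x

-- ===== PRECONDITION & SPEC =====
def Spec_eventType (x : String) (out : Option String) : Prop := out = eventType_alt x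
instance (x : String) (out : Option String) : Decidable (Spec_eventType x out) := by unfold Spec_eventType; infer_instance

-- ===== CLAIM (what is proved, stated in full; the proofs are below) =====
def Claim_equal_eventType : Prop := ∀ (x : String), Dom_eventType x → Spec_eventType x (eventType x)

-- ===== LEMMAS AND PROOFS =====
def eventPairs : List (String × String) :=
  eventRList.map (fun e => (e, "R")) ++ eventFList.map (fun e => (e, "F"))

-- A's scan over one tuple is find? over the tagged pair list
lemma scanFor_eq_find (l : List String) (x t : String) :
    scanFor l x t = ((l.map (fun e => (e, t))).find? (fun p => p.1 == x)).map Prod.snd := by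
  induction l with
  | nil => rfl
  | cons i rest ih =>
    simp only [scanFor, List.map, List.find?]
    by_cases h : (i == x) = true <;> simp [h, ih]

lemma eventType_eq_find (x : String) :
    eventType x = (eventPairs.find? (fun p => p.1 == x)).map Prod.snd := by
  unfold eventType eventPairs
  rw [scanFor_eq_find, scanFor_eq_find, List.find?_append]
  cases h : (eventRList.map (fun e => (e, "R"))).find? (fun p => p.1 == x) <;> simp

-- first match = head of the filtered list
lemma find?_eq_head?_filter {α : Type} (p : α → Bool) (l : List α) :
    l.find? p = (l.filter p).head? := by
  induction l with
  | nil => rfl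
  | cons a l ih =>
    by_cases h : p a = true
    · rw [List.find?_cons_of_pos h, List.filter_cons_of_pos h]; rfl
    · rw [List.find?_cons_of_neg h, List.filter_cons_of_neg h]; exact ih

-- with pairwise-distinct keys, at most one pair matches
lemma filter_key_len_le {l : List (String × String)} (h : (l.map Prod.fst).Nodup) (x : String) :
    (l.filter (fun p => p.1 == x)).length ≤ 1 := by
  induction l with
  | nil => simp
  | cons a l ih =>
    simp only [List.map, List.nodup_cons] at h
    by_cases hax : (a.1 == x) = true
    · have hx : a.1 = x := by simpa using hax
      have : l.filter (fun p => p.1 == x) = [] := by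
        rw [List.filter_eq_nil_iff]
        intro b hb
        have : b.1 ≠ a.1 := by
          intro he; exact h.1 (he ▸ List.mem_map_of_mem hb)
        simpa [hx] using this
      simp [List.filter, hax, this]
    · simpa [List.filter, hax] using ih h.2
  
-- find? by key is invariant under permutation when keys are distinct
lemma find?_key_eq_of_perm {l₁ l₂ : List (String × String)} (hp : l₁.Perm l₂)
    (h : (l₁.map Prod.fst).Nodup) (x : String) :
    l₁.find? (fun p => p.1 == x) = l₂.find? (fun p => p.1 == x) := by
  have h₂ : (l₂.map Prod.fst).Nodup := ((hp.map Prod.fst).nodup_iff).mp h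
  rw [find?_eq_head?_filter, find?_eq_head?_filter]
  have hpf := hp.filter (fun p => p.1 == x)
  have h1 := filter_key_len_le h x
  cases hf : l₁.filter (fun p => p.1 == x) with
  | nil =>
    rw [hf] at hpf
    rw [List.perm_nil.mp hpf.symm]
  | cons a t =>
    rw [hf] at hpf h1
    have ht : t = [] := by
      cases t with
      | nil => rfl
      | cons b t' => simp at h1
    subst ht
    have h2 : l₂.filter (fun p => p.1 == x) = [a] := List.perm_singleton.mp hpf.symm
    rw [h2]

lemma eventPairs_keys_nodup : (eventPairs.map Prod.fst).Nodup := by decide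

lemma eventTable_perm : eventTable.Perm eventPairs :=
  PySem.List.sorted_perm _ _ _

lemma eventTable_keys_nodup : (eventTable.map Prod.fst).Nodup :=
  ((eventTable_perm.map Prod.fst).nodup_iff).mpr eventPairs_keys_nodup

lemma eventTable_pairwise_lt : eventTable.Pairwise (fun a b => a.1 < b.1) := by
  have hle : eventTable.Pairwise (fun a b => a.1 ≤ b.1) :=
    PySem.List.sorted_pairwise _ _
  have hne : eventTable.Pairwise (fun a b => a.1 ≠ b.1) := by
    have hnd := eventTable_keys_nodup
    unfold List.Nodup at hnd
    exact (List.pairwise_map.mp hnd)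
  exact (hle.and hne).imp (fun h => lt_of_le_of_ne h.1 h.2)

-- binary search over a strictly key-sorted list is find? by key
lemma bsearch_eq_find (t : List (String × String)) (x : String) :
    t.Pairwise (fun a b => a.1 < b.1) →
    bsearch t x = (t.find? (fun p => p.1 == x)).map Prod.snd := by
  induction t, x using bsearch.induct with
  | case1 x => intro _; simp [bsearch]
  | case2 a rest x t m hget =>
    intro _
    rw [PySem.List.pyGet?_natCast, List.getElem?_eq_none_iff] at hget
    have : ¬ (a :: rest).length ≤ (a :: rest).length / 2 := by
      simp only [List.length_cons]; omega
    exact absurd hget this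
  | case3 a rest x t m k v hget hxk =>
    intro hp
    have hget' : (a :: rest)[(a :: rest).length / 2]? = some (k, v) := by
      rw [← PySem.List.pyGet?_natCast]; exact hget
    obtain ⟨hm, hkv⟩ := List.getElem?_eq_some_iff.mp hget'
    have hdec : (a :: rest) = (a :: rest).take ((a :: rest).length / 2) ++
        (k, v) :: (a :: rest).drop ((a :: rest).length / 2 + 1) := by
      conv_lhs => rw [← List.take_append_drop ((a :: rest).length / 2) (a :: rest),
        List.drop_eq_getElem_cons hm, hkv]
    rw [hdec] at hp
    obtain ⟨hpL, hpR, hcross⟩ := List.pairwise_append.mp hp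
    have hx : x = k := by simpa using hxk
    have hfind : (a :: rest).find? (fun p => p.1 == x) = some (k, v) := by
      rw [hdec, List.find?_append]
      have hL : (List.take ((a :: rest).length / 2) (a :: rest)).find? (fun p => p.1 == x) = none := by
        rw [List.find?_eq_none]
        intro b hb
        have : b.1 < k := hcross b hb (k, v) (List.mem_cons_self)
        simp [hx, ne_of_lt this]
      rw [hL, List.find?_cons_of_pos (by simp [hx]), Option.none_or]
    rw [bsearch]
    simp only [PySem.List.pyGet?_natCast, hget', hxk, if_true, hfind, Option.map_some]
  | case4 a rest x t m k v hget hxk hlt ih =>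
    intro hp
    have hget' : (a :: rest)[(a :: rest).length / 2]? = some (k, v) := by
      rw [← PySem.List.pyGet?_natCast]; exact hget
    obtain ⟨hm, hkv⟩ := List.getElem?_eq_some_iff.mp hget'
    have hdec : (a :: rest) = (a :: rest).take ((a :: rest).length / 2) ++
        (k, v) :: (a :: rest).drop ((a :: rest).length / 2 + 1) := by
      conv_lhs => rw [← List.take_append_drop ((a :: rest).length / 2) (a :: rest),
        List.drop_eq_getElem_cons hm, hkv]
    rw [hdec] at hp
    obtain ⟨hpL, hpR, hcross⟩ := List.pairwise_append.mp hp
    have hxne : x ≠ k := by simpa using hxk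
    have hR : ((k, v) :: (a :: rest).drop ((a :: rest).length / 2 + 1)).find?
        (fun p => p.1 == x) = none := by
      rw [List.find?_eq_none]
      intro b hb
      rcases List.mem_cons.mp hb with hb | hb
      · subst hb; simp [(ne_of_gt hlt : k ≠ x)]
      · have hkb : k < b.1 := List.rel_of_pairwise_cons hpR hb
        exact by simp [(ne_of_gt (lt_trans hlt hkb) : b.1 ≠ x)]
    have hslice : PySem.List.slice (a :: rest) none (some ((((a :: rest).length / 2 : Nat)) : Int)) =
        (a :: rest).take ((a :: rest).length / 2) := by
      rw [PySem.List.slice_to _ (by positivity), Int.toNat_natCast]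
    rw [bsearch]
    simp only [PySem.List.pyGet?_natCast, hget', hxk, if_false, Bool.false_eq_true, if_pos hlt]
    rw [hslice] at ih ⊢
    rw [ih hpL]
    conv_rhs => rw [hdec, List.find?_append, hR, Option.or_none]
  | case5 a rest x t m k v hget hxk hlt ih =>
    intro hp
    have hget' : (a :: rest)[(a :: rest).length / 2]? = some (k, v) := by
      rw [← PySem.List.pyGet?_natCast]; exact hget
    obtain ⟨hm, hkv⟩ := List.getElem?_eq_some_iff.mp hget'
    have hdec : (a :: rest) = (a :: rest).take ((a :: rest).length / 2) ++
        (k, v) :: (a :: rest).drop ((a :: rest).length / 2 + 1) := by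
      conv_lhs => rw [← List.take_append_drop ((a :: rest).length / 2) (a :: rest),
        List.drop_eq_getElem_cons hm, hkv]
    rw [hdec] at hp
    obtain ⟨hpL, hpR, hcross⟩ := List.pairwise_append.mp hp
    have hxne : x ≠ k := by simpa using hxk
    have hkx : k < x := lt_of_le_of_ne (le_of_not_gt hlt) (Ne.symm hxne)
    have hL : (List.take ((a :: rest).length / 2) (a :: rest)).find? (fun p => p.1 == x) = none := by
      rw [List.find?_eq_none]
      intro b hb
      have hbk : b.1 < k := hcross b hb (k, v) (List.mem_cons_self)
      simp [(ne_of_lt (lt_trans hbk hkx) : b.1 ≠ x)]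
    have hslice : PySem.List.slice (a :: rest)
        (some (((((a :: rest).length / 2 : Nat)) : Int) + 1)) none =
        (a :: rest).drop ((a :: rest).length / 2 + 1) := by
      rw [PySem.List.slice_from _ (by positivity)]
      have h1 : (((((a :: rest).length / 2 : Nat)) : Int) + 1).toNat =
          (a :: rest).length / 2 + 1 := by omega
      rw [h1]
    rw [bsearch]
    simp only [PySem.List.pyGet?_natCast, hget', hxk, if_false, Bool.false_eq_true, if_neg hlt]
    rw [hslice] at ih ⊢
    rw [ih hpR.of_cons]
    conv_rhs => rw [hdec, List.find?_append, hL, Option.none_or,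
      List.find?_cons_of_neg (by simp [Ne.symm hxne])]

-- ===== VERDICT (by name: the statement is the Claim_ definition above) =====
theorem eventType_spec : Claim_equal_eventType := by
  intro x _
  unfold Spec_eventType eventType_alt
  rw [eventType_eq_find, bsearch_eq_find _ _ eventTable_pairwise_lt,
    find?_key_eq_of_perm eventTable_perm eventTable_keys_nodup]
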